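-- pv_equiv track=rewrite | github.com/zhibobo/DSA4265 | ba_data_extraction/banking_act_preprocessor.py | map_sections
-- ===== SOURCE A (Python) =====
-- def map_sections(list_references, section_dict):
--     final_ref = []
--     for ref in list_references:
--         if ref in section_dict.keys():
--             for id in section_dict[ref]:
--                 final_ref.append(id)
--         else:
--             final_ref.append(ref)
--     final_ref = list(dict.fromkeys(final_ref)) # remove duplicates
--     return final_ref
-- ===== SOURCE B (Python) =====
-- def map_sections(list_references, section_dict):
--     expanded = [x for ref in list_references
--                   for x in (section_dict[ref] if ref in section_dict else [ref])]
--     return _dedup(expanded)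
--
-- def _dedup(items):
--     # first-occurrence dedup by head-and-filter: take the head, delete every
--     # later copy of it from the remainder, repeat; no seen structure at all
--     out = []
--     rest = items
--     while rest:
--         head = rest[0]
--         out.append(head)
--         rest = [x for x in rest[1:] if x != head]
--     return out
-- ===== Notes on version B (the rewrite author's own statement) =====
-- stated objective: alternative
-- what changed: A builds the expanded list with nested append loops and dedups it with dict.fromkeys (hash-based seen bookkeeping); B expands via a comprehension and dedups by head-and-filter: repeatedly take the head, filter every later copy of it out of the remainder — no seen structure or hashing at all, trading the hash pass for quadratic filtering.
import Mathlib
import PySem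

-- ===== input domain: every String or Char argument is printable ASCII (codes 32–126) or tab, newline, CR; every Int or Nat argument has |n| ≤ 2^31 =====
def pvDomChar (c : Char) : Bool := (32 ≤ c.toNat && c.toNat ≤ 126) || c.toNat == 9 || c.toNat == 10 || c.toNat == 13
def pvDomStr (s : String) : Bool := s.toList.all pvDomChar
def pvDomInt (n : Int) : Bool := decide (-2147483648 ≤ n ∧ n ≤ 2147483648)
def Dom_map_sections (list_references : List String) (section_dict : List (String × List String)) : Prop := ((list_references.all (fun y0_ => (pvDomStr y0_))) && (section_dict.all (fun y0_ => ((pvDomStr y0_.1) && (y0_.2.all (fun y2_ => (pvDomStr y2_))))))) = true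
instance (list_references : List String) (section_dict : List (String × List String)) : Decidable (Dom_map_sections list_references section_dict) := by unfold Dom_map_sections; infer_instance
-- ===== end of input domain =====

-- B replaces A's dict.fromkeys dedup with a head-and-filter dedup (take the head, filter its later copies out of the remainder; no seen structure) over a comprehension-built expansion; alternative algorithm, same result.


-- ===== PORT A =====
-- A: append loops building final_ref (the ref's expansion, or the ref itself), then dedup via dict.fromkeys.
def map_sections (list_references : List String) (section_dict : List (String × List String)) : List String :=
  PySem.List.dedup
    (list_references.foldl (fun acc ref =>
      match PySem.Dict.get? ⟨section_dict⟩ ref with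
      | some ids => ids.foldl (fun a i => a ++ [i]) acc
      | none => acc ++ [ref]) [])

-- ===== PORT B =====
-- B's _dedup loop as the obvious recursion over its state: emit the head, filter its copies out of the remainder, continue.
def pvDedup : List String → List String
  | [] => []
  | h :: t => h :: pvDedup (t.filter (fun x => x ≠ h))
termination_by l => l.length
decreasing_by
  exact Nat.lt_succ_of_le ((le_of_eq List.length_unattach).trans ((List.length_filter_le _ t.attach).trans (le_of_eq List.length_attach)))

-- B: comprehension-built expansion, then the head-and-filter dedup.
def map_sections_alt (list_references : List String) (section_dict : List (String × List String)) : List String :=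
  pvDedup
    (list_references.flatMap (fun ref =>
      match PySem.Dict.get? ⟨section_dict⟩ ref with
      | some ids => ids
      | none => [ref]))

-- ===== PRECONDITION & SPEC =====
def Spec_map_sections (list_references : List String) (section_dict : List (String × List String)) (out : List String) : Prop := out = map_sections_alt list_references section_dict
instance (list_references : List String) (section_dict : List (String × List String)) (out : List String) : Decidable (Spec_map_sections list_references section_dict out) := by unfold Spec_map_sections; infer_instance

-- ===== CLAIM (what is proved, stated in full; the proofs are below) =====
def Claim_equal_map_sections : Prop := ∀ (list_references : List String) (section_dict : List (String × List String)), Dom_map_sections list_references section_dict → Spec_map_sections list_references section_dict (map_sections list_references section_dict)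

-- ===== LEMMAS AND PROOFS =====

-- the chunk of output items a single reference contributes (the same in both programs)
def pvChunk (section_dict : List (String × List String)) (ref : String) : List String :=
  match PySem.Dict.get? ⟨section_dict⟩ ref with
  | some ids => ids
  | none => [ref]

-- A's builder loop equals the flattened chunk list
theorem a_build_eq (sd : List (String × List String)) (lr : List String) (acc : List String) :
    lr.foldl (fun acc ref =>
      match PySem.Dict.get? ⟨sd⟩ ref with
      | some ids => ids.foldl (fun a i => a ++ [i]) acc
      | none => acc ++ [ref]) acc
      = acc ++ lr.flatMap (pvChunk sd) := by
  induction lr generalizing acc with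
  | nil => simp
  | cons r rest ih =>
    simp only [List.foldl_cons, List.flatMap_cons, ih, pvChunk]
    cases h : PySem.Dict.get? (⟨sd⟩ : PySem.Dict String (List String)) r with
    | none => simp [List.append_assoc]
    | some ids =>
      rw [show (match some ids with
          | some ids => List.foldl (fun a i => a ++ [i]) acc ids
          | none => acc ++ [r]) = List.foldl (fun a i => a ++ [i]) acc ids from rfl,
        PySem.List.foldl_append_singleton, List.append_assoc]

-- B's pvDedup unfolded one step (its equation, restated for rewriting)
theorem pvDedup_cons (x : String) (t : List String) :
    pvDedup (x :: t) = x :: pvDedup (t.filter (fun y => y ≠ x)) := by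
  rw [pvDedup.eq_def]

-- A's seen-set dedup (foldl Set.add) equals B's head-and-filter dedup of the not-yet-seen elements
theorem foldl_add_eq_pvDedup (L : List String) (s : List String) :
    L.foldl PySem.Set.add s = s ++ pvDedup (L.filter (fun x => x ∉ s)) := by
  induction L generalizing s with
  | nil => simp [pvDedup]
  | cons x t ih =>
    rw [List.foldl_cons, List.filter_cons]
    by_cases h : x ∈ s
    · simp [PySem.Set.add, ih, h]
    · have hadd : PySem.Set.add s x = s ++ [x] := by simp [PySem.Set.add, h]
      rw [hadd, ih, if_pos (by simp [h])]
      rw [pvDedup_cons, List.append_assoc, List.singleton_append]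
      congr 2
      rw [List.filter_filter]
      congr 1
      apply List.filter_congr
      intro y _
      simp [not_or, and_comm]

-- ===== VERDICT (by name: the statement is the Claim_ definition above) =====
theorem map_sections_spec : Claim_equal_map_sections := by
  intro lr sd _
  show map_sections lr sd = map_sections_alt lr sd
  unfold map_sections map_sections_alt
  rw [a_build_eq, List.nil_append]
  simp only [PySem.List.dedup_eq_ofList, PySem.Set.ofList_eq_foldl]
  simpa [pvChunk] using foldl_add_eq_pvDedup (lr.flatMap (pvChunk sd)) []
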